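-- pv_equiv track=rewrite | github.com/azizmrsh/shamela_scraper | core/enhanced_shamela_scraper.py | find_internal_page_for_printed
-- ===== SOURCE A (Python) =====
-- from typing import List, Optional, Dict, Tuple, Union, Any
--
-- def find_internal_page_for_printed(printed_page: int, navigation_map: Dict[int, int]) -> Optional[int]:
--     """
--     دالة مساعدة للعثور على N الداخلي لرقم ص مطبوع
--     """
--     if printed_page in navigation_map:
--         return navigation_map[printed_page]
--
--     # البحث عن أقرب صفحة مطبوعة أكبر أو تساوي
--     sorted_printed = sorted(navigation_map.keys())
--     for p in sorted_printed:
--         if p >= printed_page: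
--             return navigation_map[p]
--
--     # إذا لم توجد، ارجع آخر صفحة
--     if sorted_printed:
--         return navigation_map[sorted_printed[-1]]
--
--     return None
-- ===== SOURCE B (Python) =====
-- from typing import List, Optional, Dict, Tuple, Union, Any
--
-- def find_internal_page_for_printed(printed_page: int, navigation_map: Dict[int, int]) -> Optional[int]:
--     """Binary search over the sorted keys for the smallest key >= printed_page."""
--     keys = sorted(navigation_map)
--     lo, hi = 0, len(keys)
--     while lo < hi:
--         mid = (lo + hi) // 2
--         if keys[mid] < printed_page:
--             lo = mid + 1
--         else:
--             hi = mid
--     if lo < len(keys):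
--         return navigation_map[keys[lo]]
--     if keys:
--         return navigation_map[keys[-1]]
--     return None
-- ===== Notes on version B (the rewrite author's own statement) =====
-- stated objective: alternative
-- what changed: Replaces A's membership check plus linear scan over the sorted keys with a single hand-written binary search (bisect_left style) on the sorted keys; the smallest key >= printed_page found by the search also covers the exact-match case, so the membership branch disappears.
import Mathlib
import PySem

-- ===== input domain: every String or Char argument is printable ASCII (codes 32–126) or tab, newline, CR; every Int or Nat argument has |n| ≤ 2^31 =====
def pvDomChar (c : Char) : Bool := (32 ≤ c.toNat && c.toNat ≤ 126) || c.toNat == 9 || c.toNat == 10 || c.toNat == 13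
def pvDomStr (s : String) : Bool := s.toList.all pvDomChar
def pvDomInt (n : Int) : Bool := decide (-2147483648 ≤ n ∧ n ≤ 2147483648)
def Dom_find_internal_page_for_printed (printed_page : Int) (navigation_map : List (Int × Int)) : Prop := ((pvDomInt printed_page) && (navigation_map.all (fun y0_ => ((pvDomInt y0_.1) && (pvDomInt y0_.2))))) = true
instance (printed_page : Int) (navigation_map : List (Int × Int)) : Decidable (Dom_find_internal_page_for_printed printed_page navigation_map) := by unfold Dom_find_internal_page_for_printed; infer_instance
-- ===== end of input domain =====

-- B replaces A's membership test + linear scan of the sorted keys by one binary search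
-- for the smallest key >= printed_page (alternative algorithm; same asymptotics, sort dominates).

-- ===== PORT A =====
-- the 'for p in sorted_printed: if p >= printed_page: return navigation_map[p]' loop
def pvLoopA (t : Int) (m : PySem.Dict Int Int) : List Int → Option Int
  | [] => none
  | p :: rest => if p ≥ t then PySem.Dict.get? m p else pvLoopA t m rest

def find_internal_page_for_printed (printed_page : Int) (navigation_map : List (Int × Int)) : Option Int :=
  let d := PySem.Dict.mk navigation_map
  if d.contains printed_page then
    PySem.Dict.get? d printed_page
  else
    let sorted_printed := PySem.List.sorted (PySem.Dict.keys d) (fun x => x) false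
    match pvLoopA printed_page d sorted_printed with
    | some r => some r
    | none =>
      match sorted_printed.getLast? with
      | some p => PySem.Dict.get? d p
      | none => none

-- ===== PORT B =====
-- the hand-written bisect_left while-loop of Source B
def pvBsGo (keys : List Int) (t : Int) (lo hi : Nat) : Nat :=
  if h : lo < hi then
    let mid := (lo + hi) / 2
    if keys.getD mid 0 < t then pvBsGo keys t (mid + 1) hi else pvBsGo keys t lo mid
  else lo
termination_by hi - lo
decreasing_by all_goals omega

def find_internal_page_for_printed_alt (printed_page : Int) (navigation_map : List (Int × Int)) : Option Int :=
  let d := PySem.Dict.mk navigation_map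
  let keys := PySem.List.sorted (PySem.Dict.keys d) (fun x => x) false
  let lo := pvBsGo keys printed_page 0 keys.length
  if lo < keys.length then
    PySem.Dict.get? d (keys.getD lo 0)
  else
    match keys.getLast? with
    | some p => PySem.Dict.get? d p
    | none => none

-- ===== PRECONDITION & SPEC =====
def Spec_find_internal_page_for_printed (printed_page : Int) (navigation_map : List (Int × Int)) (out : Option Int) : Prop := out = find_internal_page_for_printed_alt printed_page navigation_map
instance (printed_page : Int) (navigation_map : List (Int × Int)) (out : Option Int) : Decidable (Spec_find_internal_page_for_printed printed_page navigation_map out) := by unfold Spec_find_internal_page_for_printed; infer_instance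

-- ===== CLAIM (what is proved, stated in full; the proofs are below) =====
def Claim_equal_find_internal_page_for_printed : Prop := ∀ (printed_page : Int) (navigation_map : List (Int × Int)), Dom_find_internal_page_for_printed printed_page navigation_map → Spec_find_internal_page_for_printed printed_page navigation_map (find_internal_page_for_printed printed_page navigation_map)

-- ===== LEMMAS AND PROOFS =====

-- index of the first element ≥ t (list length if none)
def pvFge (t : Int) : List Int → Nat
  | [] => 0
  | x :: xs => if x < t then pvFge t xs + 1 else 0

theorem pvFge_le (t : Int) (l : List Int) : pvFge t l ≤ l.length := by
  induction l with
  | nil => simp [pvFge]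
  | cons x xs ih => simp only [pvFge, List.length_cons]; split <;> omega

theorem pvFge_lt (t : Int) (l : List Int) : ∀ i, i < pvFge t l → l.getD i 0 < t := by
  induction l with
  | nil => simp [pvFge]
  | cons x xs ih =>
    intro i hi
    simp only [pvFge] at hi
    split at hi
    · cases i with
      | zero => simpa
      | succ j => simpa using ih j (by omega)
    · omega

theorem pvFge_ge (t : Int) (l : List Int) (hp : l.Pairwise (· ≤ ·)) :
    ∀ i, pvFge t l ≤ i → i < l.length → ¬ l.getD i 0 < t := by
  induction l with
  | nil => simp
  | cons x xs ih =>
    rcases List.pairwise_cons.mp hp with ⟨hx, hxs⟩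
    intro i h1 h2
    simp only [pvFge] at h1
    split at h1
    · cases i with
      | zero => omega
      | succ j =>
        simpa using ih hxs j (by omega) (by simpa using h2)
    · rename_i hxt
      cases i with
      | zero => simpa using hxt
      | succ j =>
        have hmem : xs.getD j 0 ∈ xs := by
          rw [List.getD_eq_getElem _ _ (by simpa using h2)]
          exact List.getElem_mem _
        have := hx _ hmem
        simp only [List.getD_cons_succ]
        omega

theorem pvBsGo_eq_aux (l : List Int) (t : Int) (hp : l.Pairwise (· ≤ ·)) :
    ∀ (n lo hi : Nat), hi - lo ≤ n → lo ≤ pvFge t l → pvFge t l ≤ hi → hi ≤ l.length →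
      pvBsGo l t lo hi = pvFge t l := by
  intro n
  induction n with
  | zero =>
    intro lo hi h1 h2 h3 h4
    unfold pvBsGo
    rw [dif_neg (by omega)]
    omega
  | succ n ih =>
    intro lo hi h1 h2 h3 h4
    unfold pvBsGo
    split
    · rename_i hlt
      dsimp only
      split
      · rename_i hm
        have hge : (lo + hi) / 2 + 1 ≤ pvFge t l := by
          by_contra hc
          exact pvFge_ge t l hp _ (by omega) (by omega) hm
        exact ih _ _ (by omega) hge h3 h4
      · rename_i hm
        have hle : pvFge t l ≤ (lo + hi) / 2 := by
          by_contra hc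
          exact hm (pvFge_lt t l _ (by omega))
        exact ih _ _ (by omega) h2 hle (by omega)
    · omega

theorem pvBsGo_eq (l : List Int) (t : Int) (hp : l.Pairwise (· ≤ ·)) :
    pvBsGo l t 0 l.length = pvFge t l :=
  pvBsGo_eq_aux l t hp l.length 0 l.length (by omega) (by omega) (pvFge_le t l) le_rfl

theorem pvLoopA_eq (t : Int) (m : PySem.Dict Int Int) (l : List Int) :
    pvLoopA t m l = if pvFge t l < l.length then PySem.Dict.get? m (l.getD (pvFge t l) 0) else none := by
  induction l with
  | nil => simp [pvLoopA, pvFge]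
  | cons x xs ih =>
    simp only [pvLoopA, pvFge]
    by_cases hx : x < t
    · rw [if_neg (by omega), if_pos hx, ih]
      simp only [List.length_cons, List.getD_cons_succ]
      split_ifs with h1 h2 h2 <;> first | rfl | omega
    · rw [if_pos (by omega), if_neg hx]
      simp

theorem pvSorted_pairwise_le (l : List Int) :
    (PySem.List.sorted l (fun x => x) false).Pairwise (· ≤ ·) := by
  simpa using PySem.List.sorted_pairwise l (fun x => x)

theorem find_internal_page_for_printed_eq_alt (printed_page : Int) (navigation_map : List (Int × Int)) :
    find_internal_page_for_printed printed_page navigation_map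
      = find_internal_page_for_printed_alt printed_page navigation_map := by
  unfold find_internal_page_for_printed find_internal_page_for_printed_alt
  dsimp only
  set d := PySem.Dict.mk navigation_map with hd
  set sk := PySem.List.sorted (PySem.Dict.keys d) (fun x => x) false with hsk
  have hp : sk.Pairwise (· ≤ ·) := pvSorted_pairwise_le _
  rw [pvBsGo_eq sk printed_page hp, pvLoopA_eq]
  by_cases hc : d.contains printed_page = true
  · rw [if_pos hc]
    -- printed_page is among the sorted keys
    have hmem : printed_page ∈ sk := by
      rw [hsk, PySem.List.mem_sorted]
      exact (PySem.Dict.contains_iff_mem_keys d printed_page).mp hc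
    obtain ⟨j, hj, hje⟩ := List.getElem_of_mem hmem
    have hjge : ¬ sk[j] < printed_page := by omega
    have hfle : pvFge printed_page sk ≤ j := by
      by_contra hcc
      have := pvFge_lt printed_page sk j (by omega)
      rw [List.getD_eq_getElem _ _ hj] at this
      omega
    have hflt : pvFge printed_page sk < sk.length := by omega
    rw [if_pos hflt]
    -- the element at the first-≥ index equals printed_page
    have hne : sk.getD (pvFge printed_page sk) 0 = printed_page := by
      have h1 : ¬ sk.getD (pvFge printed_page sk) 0 < printed_page :=
        pvFge_ge printed_page sk hp _ le_rfl hflt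
      have h2 : sk.getD (pvFge printed_page sk) 0 ≤ sk[j] := by
        rcases Nat.lt_or_ge (pvFge printed_page sk) j with h | h
        · have := (List.pairwise_iff_getElem.mp hp) _ _ hflt hj h
          rw [List.getD_eq_getElem _ _ hflt]
          exact this
        · have heq : pvFge printed_page sk = j := by omega
          rw [List.getD_eq_getElem _ _ hflt]
          simp only [heq]
          exact le_rfl
      omega
    rw [hne]
  · rw [if_neg hc]
    by_cases hflt : pvFge printed_page sk < sk.length
    · rw [if_pos hflt, if_pos hflt]
      -- the looked-up key is a real key, so get? returns some and the match passes it through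
      have hkm : sk.getD (pvFge printed_page sk) 0 ∈ PySem.Dict.keys d := by
        rw [← PySem.List.mem_sorted (xs := PySem.Dict.keys d) (key := fun x => x) (rev := false), ← hsk]
        rw [List.getD_eq_getElem _ _ hflt]
        exact List.getElem_mem _
      have hns : PySem.Dict.get? d (sk.getD (pvFge printed_page sk) 0) ≠ none := by
        intro hnone
        exact (PySem.Dict.get?_eq_none_iff_not_mem_keys _ _ |>.mp hnone) hkm
      obtain ⟨v, hv⟩ := Option.ne_none_iff_exists'.mp hns
      rw [hv]
    · rw [if_neg hflt, if_neg hflt]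

-- ===== VERDICT (by name: the statement is the Claim_ definition above) =====
theorem find_internal_page_for_printed_spec : Claim_equal_find_internal_page_for_printed := by
  intro printed_page navigation_map _
  exact find_internal_page_for_printed_eq_alt printed_page navigation_map
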